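-- pv_equiv track=rewrite | github.com/KitKatCha/adaptsearch | scripts/01_Filter_Assemblies/filter_assemblies.py | filter_redundancy_trinity
-- ===== SOURCE A (Python) =====
-- def filter_redundancy_trinity(dict_in):
--
--     dict_step_one = {}
--     dict_unredundant = {}
--
--     for header, sequence in dict_in.items():
--         h_split = header.split('_')
--         short_fasta_name = h_split[0] # + '_' + h_split[1]
--         countN = sequence.count('N')
--         length = len(sequence)
--         effective_length = length - countN
--
--         if short_fasta_name not in list(dict_step_one.keys()):
--             dict_step_one[short_fasta_name] = [[header, sequence, effective_length]]
--         else: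
--             dict_step_one[short_fasta_name].append([header, sequence, effective_length])
--
--     for key in list(dict_step_one.keys()):
--         # If one transcript per locus : record directly
--         if len(dict_step_one[key]) == 1:
--             entry = dict_step_one[key][0]
--             name = entry[0]
--             seq = entry[1]
--             dict_unredundant[name] = seq
--
--         # If more than one transcript per locus : choose the longest sequence (effective_length)
--         elif len(dict_step_one[key]) > 1:
--             max_length = {}
--             for entry in dict_step_one[key]:    ## key = short fasta name    || VALUE = list of list, e.g. :  [[fasta_name1, fasta_seq1],[fasta_name2, fasta_seq2][fasta_name3, fasta_seq3]]
--                 name = entry[0]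
--                 seq = entry[1]
--                 effective_length = entry[2]
--
--                 ## Bash for [CRITERIA 1]
--                 max_length[effective_length] = entry
--
--             ## Sort keys() for max_length dict_step_one
--             KC = list(max_length.keys())
--             KC.sort()
--
--             ## Select the best entry
--             max_length_key = KC[-1]  ## [CRITERIA 1]
--             best_entry = max_length[max_length_key]
--
--             best_fasta_name = best_entry[0]
--             best_seq = best_entry[1]
--             dict_unredundant[best_fasta_name] = best_seq
--
--     return dict_unredundant
-- ===== SOURCE B (Python) =====
-- def filter_redundancy_trinity(dict_in):
--     # One pass: keep, per locus (header prefix before '_'), the last transcript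
--     # attaining the maximal effective length (len - count('N')).
--     best = {}
--     for header, sequence in dict_in.items():
--         locus = header.split('_')[0]
--         eff = len(sequence) - sequence.count('N')
--         cur = best.get(locus)
--         if cur is None or cur[0] <= eff:
--             best[locus] = (eff, header, sequence)
--     return {h: s for (_e, h, s) in best.values()}
-- ===== Notes on version B (the rewrite author's own statement) =====
-- stated objective: faster
-- what changed: Replaces A's two-phase pipeline (group transcripts per locus via a linear 'not in list(keys)' scan, then per group build a dict keyed by effective length, sort its keys and index the maximum) by a single pass keeping one running best (effective_length, header, sequence) per locus with dict lookups, replacing on >= so later ties win exactly as A's overwrite-then-sort does.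
import Mathlib
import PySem

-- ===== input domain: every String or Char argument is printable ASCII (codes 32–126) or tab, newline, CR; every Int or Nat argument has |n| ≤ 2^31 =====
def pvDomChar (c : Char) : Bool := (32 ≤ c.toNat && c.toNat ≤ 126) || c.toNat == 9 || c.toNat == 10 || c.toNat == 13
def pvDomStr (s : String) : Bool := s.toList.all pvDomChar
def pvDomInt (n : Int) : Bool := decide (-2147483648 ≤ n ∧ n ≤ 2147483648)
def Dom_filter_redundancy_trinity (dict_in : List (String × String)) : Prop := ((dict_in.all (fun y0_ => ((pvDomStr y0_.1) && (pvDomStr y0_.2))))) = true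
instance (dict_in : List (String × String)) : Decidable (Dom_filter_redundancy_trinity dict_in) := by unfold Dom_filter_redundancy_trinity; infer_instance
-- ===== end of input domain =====

-- B replaces A's group-then-(dict-keyed-by-length, sort, take-last) selection by a single
-- running-best pass per locus, removing A's per-item scan of list(dict.keys()) (objective:
-- faster; a timing run measured it).  Neither implementation mutates its argument.

-- ===== PORT A =====
-- the parameter is a Python dict: both ports first canonicalize the association list to the
-- dict's items (last value for a repeated key wins, the key keeps its first position)
def filter_redundancy_trinity (dict_in : List (String × String)) : List (String × String) :=
  let items := (PySem.Dict.ofList dict_in).items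
  let dict_step_one : PySem.Dict String (List (String × String × Int)) :=
    items.foldl (fun d p =>
      -- h_split[0]: split on the nonempty separator "_" always returns some nonempty list,
      -- so .getD [] / .headD "" are exact here (the Python indexing never raises)
      let short_fasta_name := ((PySem.Str.split? p.1 "_").getD []).headD ""
      let countN : Int := PySem.Str.count p.2 "N"
      let length := PySem.Str.len p.2
      let effective_length := length - countN
      if ¬ d.contains short_fasta_name then
        d.insert short_fasta_name [(p.1, p.2, effective_length)]
      else
        d.modify short_fasta_name [] (fun l => l ++ [(p.1, p.2, effective_length)]))
      PySem.Dict.empty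
  let dict_unredundant : PySem.Dict String String :=
    dict_step_one.keys.foldl (fun u key =>
      let group := dict_step_one.getD key []   -- key ∈ keys, so the Python lookup never raises
      if group.length = 1 then
        let entry := group.headD ("", "", 0)   -- [0] on a length-1 list: exact
        u.insert entry.1 entry.2.1
      else if 1 < group.length then
        let max_length : PySem.Dict Int (String × String × Int) :=
          group.foldl (fun m e => m.insert e.2.2 e) PySem.Dict.empty
        let KC := PySem.List.sorted max_length.keys id       -- KC.sort()
        let max_length_key := PySem.List.pyGetD KC (-1) 0    -- KC[-1]: KC nonempty here
        let best_entry := max_length.getD max_length_key ("", "", 0)  -- key present: exact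
        u.insert best_entry.1 best_entry.2.1
      else u) PySem.Dict.empty
  dict_unredundant.items

-- ===== PORT B =====
def filter_redundancy_trinity_alt (dict_in : List (String × String)) : List (String × String) :=
  let items := (PySem.Dict.ofList dict_in).items
  let best : PySem.Dict String (Int × String × String) :=
    items.foldl (fun b p =>
      let locus := ((PySem.Str.split? p.1 "_").getD []).headD ""
      let eff := PySem.Str.len p.2 - (PySem.Str.count p.2 "N" : Int)
      match b.get? locus with
      | none => b.insert locus (eff, p.1, p.2)
      | some cur => if cur.1 ≤ eff then b.insert locus (eff, p.1, p.2) else b)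
      PySem.Dict.empty
  -- {h: s for (_e, h, s) in best.values()}
  (best.values.foldl (fun u e => u.insert e.2.1 e.2.2) PySem.Dict.empty).items

-- ===== PRECONDITION & SPEC =====
def Spec_filter_redundancy_trinity (dict_in : List (String × String)) (out : List (String × String)) : Prop := out = filter_redundancy_trinity_alt dict_in
instance (dict_in : List (String × String)) (out : List (String × String)) : Decidable (Spec_filter_redundancy_trinity dict_in out) := by unfold Spec_filter_redundancy_trinity; infer_instance

-- ===== CLAIM (what is proved, stated in full; the proofs are below) =====
def Claim_equal_filter_redundancy_trinity : Prop := ∀ (dict_in : List (String × String)), Dom_filter_redundancy_trinity dict_in → Spec_filter_redundancy_trinity dict_in (filter_redundancy_trinity dict_in)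

-- ===== LEMMAS AND PROOFS =====

-- proof-side abbreviations for the quantities both ports compute per item
def pvLocus (h : String) : String := ((PySem.Str.split? h "_").getD []).headD ""
def pvEff (s : String) : Int := PySem.Str.len s - (PySem.Str.count s "N" : Int)
def pvEntry (p : String × String) : String × String × Int := (p.1, p.2, pvEff p.2)
-- B's per-locus running-best step, on A-shaped entries (header, sequence, eff)
def pvStepE (o : Option (String × String × Int)) (e : String × String × Int) :
    Option (String × String × Int) :=
  match o with
  | none => some e
  | some c => if c.2.2 ≤ e.2.2 then some e else o
-- B's per-locus running-best step as B's fold performs it on raw items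
def pvStepB (o : Option (Int × String × String)) (p : String × String) :
    Option (Int × String × String) :=
  match o with
  | none => some (pvEff p.2, p.1, p.2)
  | some cur => if cur.1 ≤ pvEff p.2 then some (pvEff p.2, p.1, p.2) else o
def pvTr (e : String × String × Int) : Int × String × String := (e.2.2, e.1, e.2.1)
-- the group A builds for locus g, and the selected best entry
def pvGroup (L : List (String × String)) (g : String) : List (String × String × Int) :=
  (L.filter (fun p => pvLocus p.1 == g)).map pvEntry
def pvSelE (G : List (String × String × Int)) : Option (String × String × Int) :=
  G.foldl pvStepE none

theorem pv_foldl_some (α : Type) (xs : List α) (o : Option α) (h : xs ≠ []) :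
    xs.foldl (fun _ e => some e) o = xs.getLast? := by
  induction xs using List.reverseRecOn generalizing o with
  | nil => simp at h
  | append_singleton ys y ih => simp [List.foldl_append]

theorem pv_pairwise_le_getLast (S : List Int) (h : S ≠ [])
    (hp : List.Pairwise (fun a b => a ≤ b) S) : ∀ a ∈ S, a ≤ S.getLast h := by
  induction S with
  | nil => simp at h
  | cons a T ih =>
    intro x hx
    cases T with
    | nil =>
      simp at hx
      subst hx
      simp [List.getLast]
    | cons b T' =>
      rw [List.getLast_cons (by simp)]
      rcases List.mem_cons.mp hx with rfl | hxT
      · have hb : x ≤ b := (List.pairwise_cons.mp hp).1 b (by simp)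
        have := ih (by simp) (List.pairwise_cons.mp hp).2 b (by simp)
        exact le_trans hb this
      · exact ih (by simp) (List.pairwise_cons.mp hp).2 x hxT

-- KC[-1] after KC.sort() is the maximum key
theorem pv_sorted_last_max (K : List Int) (M : Int) (hM : K.max? = some M) :
    PySem.List.pyGetD (PySem.List.sorted K id) (-1) 0 = M := by
  have hKne : K ≠ [] := by
    intro h; subst h; simp at hM
  have hperm : (PySem.List.sorted K id false).Perm K := PySem.List.sorted_perm K id false
  have hSne : PySem.List.sorted K id false ≠ [] := by
    intro h
    exact hKne (List.Perm.eq_nil (h ▸ hperm).symm)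
  rw [PySem.List.pyGetD_neg_one _ _ hSne]
  obtain ⟨hMmem, hMmax⟩ := List.max?_eq_some_iff.mp hM
  have hpair : List.Pairwise (fun a b => a ≤ b) (PySem.List.sorted K id false) := by
    simpa using PySem.List.sorted_pairwise K id
  have hlast_mem : (PySem.List.sorted K id false).getLast hSne ∈ K :=
    hperm.mem_iff.mp (List.getLast_mem hSne)
  have h1 : (PySem.List.sorted K id false).getLast hSne ≤ M := hMmax _ hlast_mem
  have h2 : M ≤ (PySem.List.sorted K id false).getLast hSne := by
    have hMS : M ∈ PySem.List.sorted K id false := hperm.mem_iff.mpr hMmem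
    exact pv_pairwise_le_getLast _ hSne hpair M hMS
  omega

-- the running best over a group is the LAST entry attaining the maximal effective length
theorem pv_selE_max (G : List (String × String × Int)) (M : Int)
    (hM : (G.map (fun e => e.2.2)).max? = some M) :
    pvSelE G = (G.filter (fun e => e.2.2 == M)).getLast? := by
  induction G using List.reverseRecOn generalizing M with
  | nil => simp at hM
  | append_singleton H e ih =>
    rcases eq_or_ne H [] with rfl | hHne
    · simp only [List.nil_append, List.map_cons, List.map_nil] at hM
      have hMe : M = e.2.2 := by
        obtain ⟨h1, _⟩ := List.max?_eq_some_iff.mp hM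
        simpa using h1
      subst hMe
      simp [pvSelE, pvStepE]
    · -- H nonempty: get its max MH
      cases hmh : (H.map (fun e => e.2.2)).max? with
      | none =>
        exact absurd (List.map_eq_nil_iff.mp (List.max?_eq_none_iff.mp hmh)) hHne
      | some MH =>
        obtain ⟨hMHmem, hMHmax⟩ := List.max?_eq_some_iff.mp hmh
        obtain ⟨hMmem, hMmax⟩ := List.max?_eq_some_iff.mp hM
        have hIH := ih MH hmh
        -- the filtered list at MH is nonempty, with last element c of eff MH
        obtain ⟨a, haH, haeff⟩ := List.mem_map.mp hMHmem
        have hfne : H.filter (fun e => e.2.2 == MH) ≠ [] := by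
          have : a ∈ H.filter (fun e => e.2.2 == MH) :=
            List.mem_filter.mpr ⟨haH, by simp [haeff]⟩
          intro hnil; rw [hnil] at this; simp at this
        obtain ⟨c, hc⟩ : ∃ c, (H.filter (fun e => e.2.2 == MH)).getLast? = some c := by
          cases hfil : (H.filter (fun e => e.2.2 == MH)).getLast? with
          | none => exact absurd (List.getLast?_eq_none_iff.mp hfil) hfne
          | some c => exact ⟨c, rfl⟩
        have hcfilter : c ∈ H.filter (fun e => e.2.2 == MH) := List.mem_of_getLast? hc
        have hceff : c.2.2 = MH := by
          have := (List.mem_filter.mp hcfilter).2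
          simpa using this
        have hsel : pvSelE H = some c := by rw [hIH, hc]
        have hselstep : pvSelE (H ++ [e]) = pvStepE (some c) e := by
          simp only [pvSelE, List.foldl_append, List.foldl_cons, List.foldl_nil]
          rw [← hsel]; rfl
        have hMe_mem : e.2.2 ≤ M := hMmax _ (by simp)
        rcases le_or_gt MH e.2.2 with hle | hgt
        · -- new element wins; M = e.2.2
          have hMeq : M = e.2.2 := by
            have h1 : M ≤ e.2.2 := by
              rcases List.mem_map.mp hMmem with ⟨b, hb, hbeff⟩
              rcases List.mem_append.mp hb with hbH | hbe
              · have : M ≤ MH := by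
                  rw [← hbeff]; exact hMHmax _ (List.mem_map_of_mem hbH)
                omega
              · simp at hbe; rw [← hbeff, hbe]
            omega
          subst hMeq
          rw [hselstep]
          have : pvStepE (some c) e = some e := by
            simp [pvStepE, hceff, hle]
          rw [this, List.filter_append]
          simp
        · -- old best stays; M = MH
          have hMeq : M = MH := by
            have h2 : MH ≤ M := hMmax _ (by rw [List.map_append]; exact List.mem_append_left _ hMHmem)
            have h1 : M ≤ MH := by
              rcases List.mem_map.mp hMmem with ⟨b, hb, hbeff⟩
              rcases List.mem_append.mp hb with hbH | hbe
              · rw [← hbeff]; exact hMHmax _ (List.mem_map_of_mem hbH)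
              · simp at hbe; rw [← hbeff, hbe]; omega
            omega
          subst hMeq
          rw [hselstep]
          have : pvStepE (some c) e = some c := by
            simp [pvStepE, hceff]; omega
          rw [this, List.filter_append]
          have : [e].filter (fun x => x.2.2 == M) = [] := by
            simp; omega
          rw [this, List.append_nil, hc]

-- A's per-group max_length dict, looked up at any key
theorem pv_mdict_get (G : List (String × String × Int)) (m0 : PySem.Dict Int (String × String × Int)) (k : Int) :
    (G.foldl (fun m e => m.insert e.2.2 e) m0).get? k =
      (G.filter (fun e => e.2.2 == k)).foldl (fun _ e => some e) (m0.get? k) := by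
  induction G generalizing m0 with
  | nil => simp
  | cons e G ih =>
    simp only [List.foldl_cons]
    rw [ih]
    by_cases hk : e.2.2 = k
    · subst hk
      simp [PySem.Dict.get?_insert_self]
    · have hne : k ≠ e.2.2 := Ne.symm hk
      rw [PySem.Dict.get?_insert, if_neg hne]
      have hb : (e.2.2 == k) = false := by simp [hk]
      simp [hb]

-- A's first loop groups: value stored at g
theorem pv_stepone_get (L : List (String × String)) (g : String) :
    (L.foldl (fun d p =>
      if ¬ d.contains (pvLocus p.1) then d.insert (pvLocus p.1) [pvEntry p]
      else d.modify (pvLocus p.1) [] (fun l => l ++ [pvEntry p]))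
      (PySem.Dict.empty : PySem.Dict String (List (String × String × Int)))).getD g [] = pvGroup L g := by
  have hstep : (fun (d : PySem.Dict String (List (String × String × Int))) (p : String × String) =>
      if ¬ d.contains (pvLocus p.1) then d.insert (pvLocus p.1) [pvEntry p]
      else d.modify (pvLocus p.1) [] (fun l => l ++ [pvEntry p]))
      = (fun d p => d.modify (pvLocus p.1) [] (fun l => l ++ [pvEntry p])) := by
    funext d p
    by_cases hc : d.contains (pvLocus p.1)
    · simp [hc]
    · simp only [Bool.not_eq_true] at hc
      simp [hc, PySem.Dict.modify, PySem.Dict.getD_of_not_contains _ _ hc]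
  rw [hstep]
  have hmap : L.foldl (fun d p => d.modify (pvLocus p.1) [] (fun l => l ++ [pvEntry p]))
      (PySem.Dict.empty : PySem.Dict String (List (String × String × Int)))
      = (L.map (fun p => (pvLocus p.1, pvEntry p))).foldl
          (fun d q => d.modify q.1 [] (fun l => l ++ [q.2])) PySem.Dict.empty := by
    rw [List.foldl_map]
  rw [hmap, PySem.Dict.getD_foldl_modify_append]
  simp only [PySem.Dict.getD_empty, List.nil_append]
  rw [List.filter_map]
  simp only [List.map_map]
  rfl

theorem pv_stepone_keys (L : List (String × String)) :
    (L.foldl (fun d p =>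
      if ¬ d.contains (pvLocus p.1) then d.insert (pvLocus p.1) [pvEntry p]
      else d.modify (pvLocus p.1) [] (fun l => l ++ [pvEntry p]))
      (PySem.Dict.empty : PySem.Dict String (List (String × String × Int)))).keys
      = PySem.Set.ofList (L.map (fun p => pvLocus p.1)) := by
  have hstep : (fun (d : PySem.Dict String (List (String × String × Int))) (p : String × String) =>
      if ¬ d.contains (pvLocus p.1) then d.insert (pvLocus p.1) [pvEntry p]
      else d.modify (pvLocus p.1) [] (fun l => l ++ [pvEntry p]))
      = (fun d p => d.modify (pvLocus p.1) [] (fun l => l ++ [pvEntry p])) := by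
    funext d p
    by_cases hc : d.contains (pvLocus p.1)
    · simp [hc]
    · simp only [Bool.not_eq_true] at hc
      simp [hc, PySem.Dict.modify, PySem.Dict.getD_of_not_contains _ _ hc]
  rw [hstep]
  rw [PySem.Dict.keys_foldl_modify_key L (fun p => pvLocus p.1) [] (fun _ p => (fun l => l ++ [pvEntry p]))]
  simp [PySem.Dict.keys_empty]
  rfl

-- B's dict, looked up at any key
theorem pv_best_get (L : List (String × String)) (b : PySem.Dict String (Int × String × String)) (g : String) :
    (L.foldl (fun b p =>
      match b.get? (pvLocus p.1) with
      | none => b.insert (pvLocus p.1) (pvEff p.2, p.1, p.2)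
      | some cur => if cur.1 ≤ pvEff p.2 then b.insert (pvLocus p.1) (pvEff p.2, p.1, p.2) else b) b).get? g
      = (L.filter (fun p => pvLocus p.1 == g)).foldl pvStepB (b.get? g) := by
  induction L generalizing b with
  | nil => simp
  | cons p L ih =>
    simp only [List.foldl_cons]
    rw [ih]
    by_cases hg : pvLocus p.1 = g
    · subst hg
      have hb : (pvLocus p.1 == pvLocus p.1) = true := by simp
      simp only [List.filter_cons, hb, if_pos, List.foldl_cons]
      congr 1
      cases hcur : b.get? (pvLocus p.1) with
      | none => simp [pvStepB, PySem.Dict.get?_insert_self]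
      | some cur =>
        by_cases hle : cur.1 ≤ pvEff p.2
        · simp [pvStepB, hle, PySem.Dict.get?_insert_self]
        · simp [pvStepB, hcur, hle]
    · have hb : (pvLocus p.1 == g) = false := by simp [hg]
      simp only [List.filter_cons, hb]
      congr 1
      cases hcur : b.get? (pvLocus p.1) with
      | none =>
        rw [PySem.Dict.get?_insert, if_neg (Ne.symm hg)]
      | some cur =>
        by_cases hle : cur.1 ≤ pvEff p.2
        · simp only [hle, if_pos]
          rw [PySem.Dict.get?_insert, if_neg (Ne.symm hg)]
        · simp [hle]

theorem pv_best_keys (L : List (String × String)) (b : PySem.Dict String (Int × String × String)) :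
    (L.foldl (fun b p =>
      match b.get? (pvLocus p.1) with
      | none => b.insert (pvLocus p.1) (pvEff p.2, p.1, p.2)
      | some cur => if cur.1 ≤ pvEff p.2 then b.insert (pvLocus p.1) (pvEff p.2, p.1, p.2) else b) b).keys
      = PySem.Set.update b.keys (L.map (fun p => pvLocus p.1)) := by
  induction L generalizing b with
  | nil => simp [PySem.Set.update]
  | cons p L ih =>
    simp only [List.foldl_cons, List.map_cons]
    rw [ih]
    have hkeys : (match b.get? (pvLocus p.1) with
        | none => b.insert (pvLocus p.1) (pvEff p.2, p.1, p.2)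
        | some cur => if cur.1 ≤ pvEff p.2 then b.insert (pvLocus p.1) (pvEff p.2, p.1, p.2) else b).keys
        = PySem.Set.add b.keys (pvLocus p.1) := by
      cases hcur : b.get? (pvLocus p.1) with
      | none =>
        have hc : b.contains (pvLocus p.1) = false := by
          rw [PySem.Dict.contains_eq_isSome_get?, hcur]; rfl
        have hcl : b.keys.contains (pvLocus p.1) = false := by
          simpa [PySem.Dict.contains_eq_decide_mem_keys, List.contains_iff_mem] using hc
        rw [PySem.Dict.keys_insert_of_not_contains _ _ hc]
        simp only [PySem.Set.add]
        simpa using hcl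
      | some cur =>
        have hc : b.contains (pvLocus p.1) = true := by
          rw [PySem.Dict.contains_eq_isSome_get?, hcur]; rfl
        have hcl : b.keys.contains (pvLocus p.1) = true := by
          simpa [PySem.Dict.contains_eq_decide_mem_keys, List.contains_iff_mem] using hc
        by_cases hle : cur.1 ≤ pvEff p.2
        · simp only [hle, if_pos]
          rw [PySem.Dict.keys_insert_of_contains _ _ hc]
          simp only [PySem.Set.add]
          simp
          simpa using hcl
        · simp only [hle, PySem.Set.add]
          simp
          simpa using hcl
    rw [hkeys]
    rfl

-- the filtered fold equals the translated group fold
theorem pv_stepB_tr (M : List (String × String)) (o : Option (String × String × Int)) :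
    M.foldl pvStepB (o.map pvTr) = ((M.map pvEntry).foldl pvStepE o).map pvTr := by
  induction M generalizing o with
  | nil => simp
  | cons p M ih =>
    simp only [List.foldl_cons, List.map_cons]
    rw [← ih]
    congr 1
    cases o with
    | none => rfl
    | some c =>
      simp only [pvStepB, pvStepE, pvTr, pvEntry, Option.map_some]
      split_ifs <;> rfl

-- folding rfl-lemmas used to phrase the unfolded ports in the pv-vocabulary
theorem pvLocus_fold (h : String) : ((PySem.Str.split? h "_").getD []).headD "" = pvLocus h := rfl
theorem pvEff_fold (s : String) : PySem.Str.len s - (PySem.Str.count s "N" : Int) = pvEff s := rfl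
theorem pvEntry_fold (p : String × String) : ((p.1, p.2, pvEff p.2) : String × String × Int) = pvEntry p := rfl

def pvBest (L : List (String × String)) (g : String) : String × String × Int :=
  (pvSelE (pvGroup L g)).getD ("", "", 0)

theorem pv_selE_mem_aux (G : List (String × String × Int)) (o : Option (String × String × Int))
    (c : String × String × Int) (h : G.foldl pvStepE o = some c) : o = some c ∨ c ∈ G := by
  induction G generalizing o with
  | nil => exact Or.inl h
  | cons e G ih =>
    rcases ih (pvStepE o e) h with hstep | hmem
    · cases o with
      | none => exact Or.inr (by simp [pvStepE] at hstep; simp [hstep])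
      | some d =>
        simp only [pvStepE] at hstep
        split_ifs at hstep
        · exact Or.inr (by simp at hstep; simp [hstep])
        · exact Or.inl hstep
    · exact Or.inr (List.mem_cons_of_mem _ hmem)

theorem pv_selE_mem (G : List (String × String × Int)) (c : String × String × Int)
    (h : pvSelE G = some c) : c ∈ G := by
  rcases pv_selE_mem_aux G none c h with h' | h'
  · exact absurd h' (by simp)
  · exact h'

-- A's per-group pipeline (dict keyed by effective length, sort keys, take last) = B's running best
theorem pv_pick_eq (G : List (String × String × Int)) (hne : G ≠ []) :
    some ((G.foldl (fun m e => m.insert e.2.2 e) PySem.Dict.empty).getD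
      (PySem.List.pyGetD (PySem.List.sorted
        (G.foldl (fun m e => m.insert e.2.2 e) PySem.Dict.empty).keys id) (-1) 0) ("", "", 0))
    = pvSelE G := by
  cases hM : (G.map (fun e => e.2.2)).max? with
  | none => exact absurd (List.map_eq_nil_iff.mp (List.max?_eq_none_iff.mp hM)) hne
  | some M =>
    have hkeys : (G.foldl (fun m e => m.insert e.2.2 e)
        (PySem.Dict.empty : PySem.Dict Int (String × String × Int))).keys
        = PySem.Set.ofList (G.map (fun e => e.2.2)) := by
      rw [PySem.Dict.keys_foldl_insert_key G (fun e => e.2.2) (fun _ e => e)]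
      simp only [PySem.Dict.keys_empty]
      rfl
    obtain ⟨hMmem, hMmax⟩ := List.max?_eq_some_iff.mp hM
    have hKmax : (PySem.Set.ofList (G.map (fun e => e.2.2))).max? = some M :=
      List.max?_eq_some_iff.mpr ⟨(PySem.Set.mem_ofList _ _).mpr hMmem,
        fun b hb => hMmax b ((PySem.Set.mem_ofList _ _).mp hb)⟩
    rw [hkeys, pv_sorted_last_max _ M hKmax]
    rw [PySem.Dict.getD_eq_get?_getD, pv_mdict_get, PySem.Dict.get?_empty]
    have hfne : G.filter (fun e => e.2.2 == M) ≠ [] := by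
      obtain ⟨a, haG, haeff⟩ := List.mem_map.mp hMmem
      intro hnil
      have : a ∈ G.filter (fun e => e.2.2 == M) := List.mem_filter.mpr ⟨haG, by simp [haeff]⟩
      rw [hnil] at this; simp at this
    rw [pv_foldl_some _ _ _ hfne, ← pv_selE_max G M hM]
    cases hsel : pvSelE G with
    | none =>
      rw [pv_selE_max G M hM] at hsel
      exact absurd (List.getLast?_eq_none_iff.mp hsel) hfne
    | some c => rfl

theorem pv_group_ne (L : List (String × String)) (g : String)
    (hg : g ∈ PySem.Set.ofList (L.map (fun p => pvLocus p.1))) : pvGroup L g ≠ [] := by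
  obtain ⟨p, hp, hloc⟩ := List.mem_map.mp ((PySem.Set.mem_ofList _ _).mp hg)
  intro hnil
  have : p ∈ L.filter (fun p => pvLocus p.1 == g) := List.mem_filter.mpr ⟨hp, by simp [hloc]⟩
  have : pvEntry p ∈ pvGroup L g := List.mem_map_of_mem this
  rw [hnil] at this
  simp at this

theorem pv_best_locus (L : List (String × String)) (g : String) (hne : pvGroup L g ≠ []) :
    pvLocus (pvBest L g).1 = g := by
  cases hsel : pvSelE (pvGroup L g) with
  | none =>
    have := pv_pick_eq (pvGroup L g) hne
    rw [hsel] at this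
    exact absurd this (by simp)
  | some c =>
    obtain ⟨p, hp, hpe⟩ := List.mem_map.mp (pv_selE_mem _ _ hsel)
    have hloc := (List.mem_filter.mp hp).2
    unfold pvBest
    rw [hsel]
    have : (pvBest L g).1 = p.1 := by unfold pvBest; rw [hsel, ← hpe]; rfl
    simp only [Option.getD_some, ← hpe, pvEntry]
    simpa using hloc

theorem pv_stepB_none (M : List (String × String)) :
    M.foldl pvStepB none = ((M.map pvEntry).foldl pvStepE none).map pvTr := by
  simpa using pv_stepB_tr M none

-- A's second-loop body, for a locus that actually occurs, inserts the best header/sequence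
theorem pv_A_body (L : List (String × String)) (g : String)
    (hg : g ∈ PySem.Set.ofList (L.map (fun p => pvLocus p.1)))
    (u : PySem.Dict String String) :
    (if (pvGroup L g).length = 1 then
      u.insert ((pvGroup L g).headD ("", "", 0)).1 ((pvGroup L g).headD ("", "", 0)).2.1
    else if 1 < (pvGroup L g).length then
      u.insert
        (((pvGroup L g).foldl (fun m e => m.insert e.2.2 e) PySem.Dict.empty).getD
          (PySem.List.pyGetD (PySem.List.sorted
            ((pvGroup L g).foldl (fun m e => m.insert e.2.2 e) PySem.Dict.empty).keys id) (-1) 0)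
          ("", "", 0)).1
        (((pvGroup L g).foldl (fun m e => m.insert e.2.2 e) PySem.Dict.empty).getD
          (PySem.List.pyGetD (PySem.List.sorted
            ((pvGroup L g).foldl (fun m e => m.insert e.2.2 e) PySem.Dict.empty).keys id) (-1) 0)
          ("", "", 0)).2.1
    else u)
    = u.insert (pvBest L g).1 (pvBest L g).2.1 := by
  have hne := pv_group_ne L g hg
  by_cases h1 : (pvGroup L g).length = 1
  · obtain ⟨e, he⟩ := List.length_eq_one_iff.mp h1
    have hb : pvBest L g = e := by unfold pvBest; rw [he]; rfl
    rw [if_pos h1, he, hb]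
    rfl
  · rw [if_neg h1]
    have h2 : 1 < (pvGroup L g).length := by
      have : (pvGroup L g).length ≠ 0 := by
        intro h0; exact hne (List.length_eq_zero_iff.mp h0)
      omega
    rw [if_pos h2]
    have hb : pvBest L g
        = ((pvGroup L g).foldl (fun m e => m.insert e.2.2 e) PySem.Dict.empty).getD
            (PySem.List.pyGetD (PySem.List.sorted
              ((pvGroup L g).foldl (fun m e => m.insert e.2.2 e) PySem.Dict.empty).keys id) (-1) 0)
            ("", "", 0) := by
      unfold pvBest
      rw [← pv_pick_eq (pvGroup L g) hne]
      rfl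
    rw [hb]

theorem pv_hdr_nodup (L : List (String × String)) :
    ((PySem.Set.ofList (L.map (fun p => pvLocus p.1))).map (fun g => (pvBest L g).1)).Nodup := by
  refine List.Nodup.map_on ?_ (PySem.Set.nodup_ofList _)
  intro x hx y hy hxy
  have h1 := pv_best_locus L x (pv_group_ne L x hx)
  have h2 := pv_best_locus L y (pv_group_ne L y hy)
  rw [← h1, ← h2, hxy]

-- A's whole second loop, as a map over the loci in first-appearance order
theorem pv_A_loop (L : List (String × String)) :
    ((PySem.Set.ofList (L.map (fun p => pvLocus p.1))).foldl (fun u key =>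
      if (pvGroup L key).length = 1 then
        u.insert ((pvGroup L key).headD ("", "", 0)).1 ((pvGroup L key).headD ("", "", 0)).2.1
      else if 1 < (pvGroup L key).length then
        u.insert
          (((pvGroup L key).foldl (fun m e => m.insert e.2.2 e) PySem.Dict.empty).getD
            (PySem.List.pyGetD (PySem.List.sorted
              ((pvGroup L key).foldl (fun m e => m.insert e.2.2 e) PySem.Dict.empty).keys id) (-1) 0)
            ("", "", 0)).1
          (((pvGroup L key).foldl (fun m e => m.insert e.2.2 e) PySem.Dict.empty).getD
            (PySem.List.pyGetD (PySem.List.sorted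
              ((pvGroup L key).foldl (fun m e => m.insert e.2.2 e) PySem.Dict.empty).keys id) (-1) 0)
            ("", "", 0)).2.1
      else u) PySem.Dict.empty).items
    = (PySem.Set.ofList (L.map (fun p => pvLocus p.1))).map
        (fun g => ((pvBest L g).1, (pvBest L g).2.1)) := by
  rw [PySem.List.foldl_congr_mem _ _ (fun u g => u.insert (pvBest L g).1 (pvBest L g).2.1) _
    (fun acc x hx => pv_A_body L x hx acc)]
  rw [PySem.Dict.items_foldl_insert_fresh _ (fun g => (pvBest L g).1) (fun g => (pvBest L g).2.1) _
    (by intro a _; simp) (pv_hdr_nodup L)]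
  rfl

-- B's dict, rendered as the same map over the same loci
theorem pv_B_loop (L : List (String × String)) :
    ((List.foldl (fun b p =>
        match b.get? (pvLocus p.1) with
        | none => b.insert (pvLocus p.1) (pvEff p.2, p.1, p.2)
        | some cur => if cur.1 ≤ pvEff p.2 then b.insert (pvLocus p.1) (pvEff p.2, p.1, p.2) else b)
        PySem.Dict.empty L).values.foldl (fun u e => u.insert e.2.1 e.2.2) PySem.Dict.empty).items
    = (PySem.Set.ofList (L.map (fun p => pvLocus p.1))).map
        (fun g => ((pvBest L g).1, (pvBest L g).2.1)) := by
  have hkeys : (List.foldl (fun b p =>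
      match b.get? (pvLocus p.1) with
      | none => b.insert (pvLocus p.1) (pvEff p.2, p.1, p.2)
      | some cur => if cur.1 ≤ pvEff p.2 then b.insert (pvLocus p.1) (pvEff p.2, p.1, p.2) else b)
      PySem.Dict.empty L).keys = PySem.Set.ofList (L.map (fun p => pvLocus p.1)) := by
    rw [pv_best_keys]
    simp only [PySem.Dict.keys_empty]
    rfl
  have hnd : (List.foldl (fun b p =>
      match b.get? (pvLocus p.1) with
      | none => b.insert (pvLocus p.1) (pvEff p.2, p.1, p.2)
      | some cur => if cur.1 ≤ pvEff p.2 then b.insert (pvLocus p.1) (pvEff p.2, p.1, p.2) else b)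
      PySem.Dict.empty L).keys.Nodup := by
    rw [hkeys]; exact PySem.Set.nodup_ofList _
  rw [PySem.Dict.values_eq_map_keys _ hnd ((0 : Int), "", ""), hkeys, List.foldl_map]
  have hcong : ∀ (acc : PySem.Dict String String),
      ∀ g ∈ PySem.Set.ofList (L.map (fun p => pvLocus p.1)),
      acc.insert ((List.foldl (fun b p =>
          match b.get? (pvLocus p.1) with
          | none => b.insert (pvLocus p.1) (pvEff p.2, p.1, p.2)
          | some cur => if cur.1 ≤ pvEff p.2 then b.insert (pvLocus p.1) (pvEff p.2, p.1, p.2) else b)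
          PySem.Dict.empty L).getD g ((0 : Int), "", "")).2.1
        ((List.foldl (fun b p =>
          match b.get? (pvLocus p.1) with
          | none => b.insert (pvLocus p.1) (pvEff p.2, p.1, p.2)
          | some cur => if cur.1 ≤ pvEff p.2 then b.insert (pvLocus p.1) (pvEff p.2, p.1, p.2) else b)
          PySem.Dict.empty L).getD g ((0 : Int), "", "")).2.2
      = acc.insert (pvBest L g).1 (pvBest L g).2.1 := by
    intro acc g hg
    have hne := pv_group_ne L g hg
    have hget : (List.foldl (fun b p =>
        match b.get? (pvLocus p.1) with
        | none => b.insert (pvLocus p.1) (pvEff p.2, p.1, p.2)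
        | some cur => if cur.1 ≤ pvEff p.2 then b.insert (pvLocus p.1) (pvEff p.2, p.1, p.2) else b)
        PySem.Dict.empty L).get? g = (pvSelE (pvGroup L g)).map pvTr := by
      rw [pv_best_get, PySem.Dict.get?_empty, pv_stepB_none]
      rfl
    cases hsel : pvSelE (pvGroup L g) with
    | none =>
      have := pv_pick_eq _ hne
      rw [hsel] at this
      exact absurd this (by simp)
    | some c =>
      have hb : pvBest L g = c := by unfold pvBest; rw [hsel]; rfl
      rw [PySem.Dict.getD_eq_get?_getD, hget, hsel, hb]
      rfl
  rw [PySem.List.foldl_congr_mem _ _ (fun u g => u.insert (pvBest L g).1 (pvBest L g).2.1) _ hcong]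
  rw [PySem.Dict.items_foldl_insert_fresh _ (fun g => (pvBest L g).1) (fun g => (pvBest L g).2.1) _
    (by intro a _; simp) (pv_hdr_nodup L)]
  rfl

-- main equivalence over an arbitrary item list
theorem pv_main (dict_in : List (String × String)) :
    filter_redundancy_trinity dict_in = filter_redundancy_trinity_alt dict_in := by
  unfold filter_redundancy_trinity filter_redundancy_trinity_alt
  simp only [pvEff_fold, pvLocus_fold, pvEntry_fold]
  generalize (PySem.Dict.ofList dict_in).items = L
  simp only [pv_stepone_get, pv_stepone_keys]
  rw [pv_A_loop, pv_B_loop]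

-- ===== VERDICT (by name: the statement is the Claim_ definition above) =====
theorem filter_redundancy_trinity_spec : Claim_equal_filter_redundancy_trinity := by
  intro dict_in _
  unfold Spec_filter_redundancy_trinity
  exact pv_main dict_in
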